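-- pv_equiv track=rewrite | github.com/iiitv/hackiiitv20-submissions | team#24-3/detec.py | findDef
-- ===== SOURCE A (Python) =====
-- def get_key(val):
--     for key, value in Def1.items():
--          if val == value:
--              return key
--
-- Def1 = {
--         1 : ['poorvision'],
--         2: ['lowernergy'],
--         3: ['scurvy', 'bleedinggums'],
--         4: ['softbones', 'bentbones'],
--         5: ['swollenneck'],
--         6: ['weakness']
--     }
--
-- Def2 = {
--         1: "Vitamin A",
--         2: "Vitamin B1",
--         3: "Vitamin C",
--         4: "Vitamin D",
--         5: "Iodine",
--         6: "Iron"
--     }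
--
-- def findDef(str1, str2, str3, str4):
--     # predefined deficiencies...
--     inputList = [str1, str2, str3, str4]
--     outputList = []
--     count1 = 0
--     for i in range(len(inputList)):
--         for val1 in Def1.values():
--             for j in val1:
--                 if inputList[i] == j:
--                     k = get_key(val1)
--                     outputList.append(Def2[k])
--     return outputList
-- ===== SOURCE B (Python) =====
-- Def1 = {
--         1 : ['poorvision'],
--         2: ['lowernergy'],
--         3: ['scurvy', 'bleedinggums'],
--         4: ['softbones', 'bentbones'],
--         5: ['swollenneck'],
--         6: ['weakness']
--     }
--
-- Def2 = {
--         1: "Vitamin A",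
--         2: "Vitamin B1",
--         3: "Vitamin C",
--         4: "Vitamin D",
--         5: "Iodine",
--         6: "Iron"
--     }
--
-- SYMPTOM_MAP = {s: Def2[k] for k, syms in Def1.items() for s in syms}
--
-- def findDef(str1, str2, str3, str4):
--     out = []
--     for s in (str1, str2, str3, str4):
--         v = SYMPTOM_MAP.get(s)
--         if v is not None:
--             out.append(v)
--     return out
-- ===== Notes on version B (the rewrite author's own statement) =====
-- stated objective: simpler
-- what changed: Replaces the triple-nested scan over Def1's value lists plus the linear get_key back-search with a flat symptom->vitamin dict built once, so each input string does a single lookup.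
import Mathlib
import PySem

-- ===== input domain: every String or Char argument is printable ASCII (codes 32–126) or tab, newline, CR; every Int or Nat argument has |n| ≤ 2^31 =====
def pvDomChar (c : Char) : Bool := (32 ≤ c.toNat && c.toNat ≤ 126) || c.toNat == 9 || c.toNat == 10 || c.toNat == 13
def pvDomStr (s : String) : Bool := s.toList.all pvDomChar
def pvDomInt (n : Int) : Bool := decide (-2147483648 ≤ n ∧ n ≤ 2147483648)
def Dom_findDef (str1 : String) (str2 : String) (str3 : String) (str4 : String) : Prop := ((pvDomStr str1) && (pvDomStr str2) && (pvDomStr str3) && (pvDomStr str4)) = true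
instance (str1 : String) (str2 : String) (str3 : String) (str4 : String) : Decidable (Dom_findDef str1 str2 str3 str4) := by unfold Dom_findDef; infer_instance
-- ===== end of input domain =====

-- B replaces A's triple-nested scan plus linear get_key back-search with one precomputed flat
-- symptom->vitamin map and a single lookup per input string (objective: simpler).


-- ===== PORT A =====
-- Def1 / Def2 as association lists in insertion order
def pvDef1 : List (Int × List String) :=
  [(1, ["poorvision"]), (2, ["lowernergy"]), (3, ["scurvy", "bleedinggums"]),
   (4, ["softbones", "bentbones"]), (5, ["swollenneck"]), (6, ["weakness"])]

def pvDef2 : PySem.Dict Int String :=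
  PySem.Dict.ofList [(1, "Vitamin A"), (2, "Vitamin B1"), (3, "Vitamin C"), (4, "Vitamin D"), (5, "Iodine"), (6, "Iron")]

-- get_key: scan Def1.items(), return the first key whose value list equals val (None if no match)
def getKey (val : List String) : Option Int :=
  pvDef1.foldl (fun acc kv => match acc with
    | some _ => acc
    | none => if val == kv.2 then some kv.1 else none) none

-- Def2[k] for k = get_key(val1); the none / missing-key branches never fire (Python would raise
-- KeyError there, which never happens since val1 is always one of Def1's values)
def pvLookupDef2 (k? : Option Int) : String :=
  match k? with
  | some k => (PySem.Dict.get? pvDef2 k).getD ""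
  | none => ""

def findDef (str1 : String) (str2 : String) (str3 : String) (str4 : String) : List String :=
  let inputList := [str1, str2, str3, str4]
  -- 'for i in range(len(inputList)): … inputList[i] …' visited left to right = fold over the list
  inputList.foldl (fun out x =>
    (pvDef1.map Prod.snd).foldl (fun out val1 =>
      val1.foldl (fun out j =>
        if x == j then out ++ [pvLookupDef2 (getKey val1)] else out) out) out) []

-- ===== PORT B =====
-- SYMPTOM_MAP: flat dict symptom -> vitamin name, built once from Def1/Def2 (its literal value)
def pvSymptomMap : PySem.Dict String String :=
  pvDef1.foldl (fun d kv =>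
    kv.2.foldl (fun d s => PySem.Dict.insert d s ((PySem.Dict.get? pvDef2 kv.1).getD "")) d)
    PySem.Dict.empty

def findDef_alt (str1 : String) (str2 : String) (str3 : String) (str4 : String) : List String :=
  [str1, str2, str3, str4].foldl (fun out s =>
    match PySem.Dict.get? pvSymptomMap s with
    | some v => out ++ [v]
    | none => out) []

-- ===== PRECONDITION & SPEC =====
def Spec_findDef (str1 : String) (str2 : String) (str3 : String) (str4 : String) (out : List String) : Prop := out = findDef_alt str1 str2 str3 str4
instance (str1 : String) (str2 : String) (str3 : String) (str4 : String) (out : List String) : Decidable (Spec_findDef str1 str2 str3 str4 out) := by unfold Spec_findDef; infer_instance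

-- ===== CLAIM (what is proved, stated in full; the proofs are below) =====
def Claim_equal_findDef : Prop := ∀ (str1 : String) (str2 : String) (str3 : String) (str4 : String), Dom_findDef str1 str2 str3 str4 → Spec_findDef str1 str2 str3 str4 (findDef str1 str2 str3 str4)

-- ===== LEMMAS AND PROOFS =====
-- One input string's contribution is the same in both programs
set_option maxHeartbeats 1000000 in
theorem pv_step_eq (out : List String) (x : String) :
    (pvDef1.map Prod.snd).foldl (fun out val1 =>
      val1.foldl (fun out j =>
        if x == j then out ++ [pvLookupDef2 (getKey val1)] else out) out) out
    = (match PySem.Dict.get? pvSymptomMap x with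
       | some v => out ++ [v]
       | none => out) := by
  have hm : pvSymptomMap = PySem.Dict.mk
      [("poorvision", "Vitamin A"), ("lowernergy", "Vitamin B1"), ("scurvy", "Vitamin C"),
       ("bleedinggums", "Vitamin C"), ("softbones", "Vitamin D"), ("bentbones", "Vitamin D"),
       ("swollenneck", "Iodine"), ("weakness", "Iron")] := rfl
  simp only [pvDef1, List.map, List.foldl]
  rw [hm,
    show pvLookupDef2 (getKey ["poorvision"]) = "Vitamin A" from rfl,
    show pvLookupDef2 (getKey ["lowernergy"]) = "Vitamin B1" from rfl,
    show pvLookupDef2 (getKey ["scurvy", "bleedinggums"]) = "Vitamin C" from rfl,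
    show pvLookupDef2 (getKey ["softbones", "bentbones"]) = "Vitamin D" from rfl,
    show pvLookupDef2 (getKey ["swollenneck"]) = "Iodine" from rfl,
    show pvLookupDef2 (getKey ["weakness"]) = "Iron" from rfl]
  simp only [PySem.Dict.get?]
  split_ifs <;> simp_all [List.find?]
  have hb : ∀ y : String, ¬ x = y → (y == x) = false := fun y h => by
    simp only [beq_eq_false_iff_ne]; exact fun hh => h hh.symm
  simp [hb _ ‹¬x = "poorvision"›, hb _ ‹¬x = "lowernergy"›, hb _ ‹¬x = "scurvy"›,
    hb _ ‹¬x = "bleedinggums"›, hb _ ‹¬x = "softbones"›, hb _ ‹¬x = "bentbones"›,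
    hb _ ‹¬x = "swollenneck"›, hb _ ‹¬x = "weakness"›]

-- ===== VERDICT (by name: the statement is the Claim_ definition above) =====
theorem findDef_spec : Claim_equal_findDef := by
  intro str1 str2 str3 str4 _
  unfold Spec_findDef findDef findDef_alt
  simp only [List.foldl]
  rw [pv_step_eq, pv_step_eq, pv_step_eq, pv_step_eq]
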